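-- pv_equiv track=rewrite | github.com/Aasthaengg/IBMdataset | Python_codes/p03013/s198333678.py | solve
-- ===== SOURCE A (Python) =====
-- MOD = 10**9+7
--
-- def solve(n,a):
--   # ～段目と対応
--   stairs = [1]*(n+10)
--   for x in a:
--     stairs[x] = 0
--
--   dp = [1] + [0] * (n+1)
--   dp[1] = stairs[1]
--   for i in range(n):
--     dp[i+2] = (dp[i] + dp[i+1]) * stairs[i+2]
--     dp[i+2] %= MOD
--
--   return dp[n]
-- ===== SOURCE B (Python) =====
-- MOD = 10**9+7
--
-- def fib(m):
--     # ways to climb m steps taking 1 or 2 at a time (mod MOD); m == -1 means impossible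
--     if m < 0:
--         return 0
--     x, y = 1, 1
--     for _ in range(m):
--         x, y = y, (x + y) % MOD
--     return x
--
-- def solve(n, a):
--     stairs = [1]*(n+10)
--     for x in a:
--         stairs[x] = 0
--     # Every broken step must be jumped over from the step just below it, so the
--     # total is the product, over the maximal runs of intact steps, of the number
--     # of ways to climb that run.
--     acc = 1
--     run = 1  # step 0 is always standable
--     for i in range(1, n+1):
--         if stairs[i]:
--             run += 1
--         else:
--             acc = acc * fib(run - 1) % MOD
--             run = 0
--     return acc * fib(run - 1) % MOD
-- ===== Notes on version B (the rewrite author's own statement) =====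
-- stated objective: alternative
-- what changed: B replaces A's additive dp-array recurrence with the combinatorial product formula: after building the same stairs mask, it multiplies, over each maximal run of intact steps, the Fibonacci-style count of ways to climb that run (computed by a small helper), instead of filling a dp table.
import Mathlib
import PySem

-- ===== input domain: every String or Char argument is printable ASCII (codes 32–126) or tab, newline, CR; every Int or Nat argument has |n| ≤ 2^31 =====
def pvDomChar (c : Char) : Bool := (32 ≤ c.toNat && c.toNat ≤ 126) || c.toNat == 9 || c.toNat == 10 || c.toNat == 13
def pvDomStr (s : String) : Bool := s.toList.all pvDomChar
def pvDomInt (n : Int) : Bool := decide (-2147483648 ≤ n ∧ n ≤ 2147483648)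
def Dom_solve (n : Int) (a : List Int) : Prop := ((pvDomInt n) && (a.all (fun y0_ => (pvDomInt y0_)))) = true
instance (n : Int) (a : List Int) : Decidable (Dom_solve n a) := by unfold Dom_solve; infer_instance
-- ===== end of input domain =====

-- B replaces A's additive dp-table recurrence with the combinatorial product formula:
-- after building the same stairs mask, it multiplies the climb counts of the maximal
-- runs of intact steps (objective: alternative algorithm of the same cost).

def MODp : Int := 1000000007

-- ===== PORT A =====
-- Python list subscript assignment/read, ported by hand on Array so that evaluation
-- keeps Python's O(1) element update; index resolution is PySem.List.pyIdx? (exact: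
-- same negative-index rule; out-of-range — where Python raises IndexError — is
-- excluded by Pre_ below, the total forms are a no-op / return 0 there).
def aSetD (xs : Array Int) (i : Int) (v : Int) : Array Int :=
  match PySem.List.pyIdx? xs.size i with
  | some k => xs.setIfInBounds k v
  | none => xs

def aGetD (xs : Array Int) (i : Int) : Int :=
  match PySem.List.pyIdx? xs.size i with
  | some k => xs.getD k 0
  | none => 0

-- one iteration of A's dp loop body: dp[i+2] = (dp[i]+dp[i+1])*stairs[i+2]; dp[i+2] %= MOD
def stepA (stairs : Array Int) (d : Array Int) (i : Int) : Array Int :=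
  let d2 := aSetD d (i+2) ((aGetD d i + aGetD d (i+1)) * aGetD stairs (i+2))
  aSetD d2 (i+2) (PySem.Int.mod (aGetD d2 (i+2)) MODp)

def solve (n : Int) (a : List Int) : Int :=
  let stairs := a.foldl (fun st x => aSetD st x 0) (Array.replicate (n+10).toNat 1)
  let dp0 : Array Int := ((1:Int) :: List.replicate (n+1).toNat 0).toArray
  let dp1 := aSetD dp0 1 (aGetD stairs 1)
  let dp := (PySem.List.pyRange 0 n 1).foldl (stepA stairs) dp1
  aGetD dp n

-- ===== PORT B =====
-- port of Source B's fib helper: ways to climb m steps by 1 or 2 (mod MOD), fib (-1) = 0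
def fibp (m : Int) : Int :=
  if m < 0 then 0
  else ((PySem.List.pyRange 0 m 1).foldl
          (fun p _ => (p.2, PySem.Int.mod (p.1 + p.2) MODp)) ((1:Int), (1:Int))).1

-- one iteration of B's scan: extend the current run of intact steps, or close it
-- and multiply its climb count into the accumulator
def stepB (stairs : Array Int) (p : Int × Int) (i : Int) : Int × Int :=
  if aGetD stairs i ≠ 0 then (p.1, p.2 + 1)
  else (PySem.Int.mod (p.1 * fibp (p.2 - 1)) MODp, 0)

def solve_alt (n : Int) (a : List Int) : Int :=
  let stairs := a.foldl (fun st x => aSetD st x 0) (Array.replicate (n+10).toNat 1)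
  let p := (PySem.List.pyRange 1 (n+1) 1).foldl (stepB stairs) ((1:Int), (1:Int))
  PySem.Int.mod (p.1 * fibp (p.2 - 1)) MODp

-- ===== PRECONDITION & SPEC =====
-- Pre_ excludes exactly the inputs on which A raises an IndexError: negative n
-- (dp[1] out of range) and broken steps outside the stairs array's index range.
def Pre_solve (n : Int) (a : List Int) : Prop :=
  0 ≤ n ∧ ∀ x ∈ a, -(n+10) ≤ x ∧ x < n+10
instance (n : Int) (a : List Int) : Decidable (Pre_solve n a) := by unfold Pre_solve; infer_instance

def pvWitness_solve : Int × List Int := (4, [2])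

def Spec_solve (n : Int) (a : List Int) (out : Int) : Prop := out = solve_alt n a
instance (n : Int) (a : List Int) (out : Int) : Decidable (Spec_solve n a out) := by unfold Spec_solve; infer_instance

-- ===== CLAIM (what is proved, stated in full; the proofs are below) =====
def Claim_equal_solve : Prop := ∀ (n : Int) (a : List Int), Dom_solve n a → Pre_solve n a → Spec_solve n a (solve n a)


-- ===== LEMMAS AND PROOFS =====

-- list-level image of stepA, used only to reason about the Array fold
def stepAL (stairs : List Int) (d : List Int) (i : Int) : List Int :=
  let d2 := PySem.List.pySetD d (i+2)
      ((PySem.List.pyGetD d i 0 + PySem.List.pyGetD d (i+1) 0) * PySem.List.pyGetD stairs (i+2) 0)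
  PySem.List.pySetD d2 (i+2) (PySem.Int.mod (PySem.List.pyGetD d2 (i+2) 0) MODp)

lemma toList_aSetD (xs : Array Int) (i v : Int) :
    (aSetD xs i v).toList = PySem.List.pySetD xs.toList i v := by
  unfold aSetD PySem.List.pySetD PySem.List.pySet?
  rw [Array.length_toList]
  cases h : PySem.List.pyIdx? xs.size i with
  | none => simp
  | some k => simp [Array.toList_setIfInBounds]

lemma aGetD_eq (xs : Array Int) (i : Int) :
    aGetD xs i = PySem.List.pyGetD xs.toList i 0 := by
  unfold aGetD PySem.List.pyGetD PySem.List.pyGet?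
  rw [Array.length_toList]
  cases h : PySem.List.pyIdx? xs.size i with
  | none => simp
  | some k => simp [Array.getD_eq_getD_getElem?, Array.getElem?_toList]

lemma toList_foldl_set (a : List Int) : ∀ init : Array Int,
    (a.foldl (fun st x => aSetD st x 0) init).toList
      = a.foldl (fun st x => PySem.List.pySetD st x 0) init.toList := by
  induction a with
  | nil => intro init; simp
  | cons x t ih => intro init; simp only [List.foldl_cons]; rw [ih, toList_aSetD]

lemma toList_stepA (stairs d : Array Int) (i : Int) :
    (stepA stairs d i).toList = stepAL stairs.toList d.toList i := by
  unfold stepA stepAL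
  rw [toList_aSetD, toList_aSetD, aGetD_eq, aGetD_eq, aGetD_eq, aGetD_eq, toList_aSetD]

lemma toList_foldl_stepA (stairs : Array Int) (l : List Int) : ∀ d : Array Int,
    (l.foldl (stepA stairs) d).toList = l.foldl (stepAL stairs.toList) d.toList := by
  induction l with
  | nil => intro d; simp
  | cons i t ih => intro d; simp only [List.foldl_cons]; rw [ih, toList_stepA]

-- the recurrence A computes, over the list L of normalized broken indices
def fModel (L : List Int) : Nat → Int
  | 0 => 1
  | 1 => if (1:Int) ∈ L then 0 else 1
  | (k+2) => if ((k:Int)+2) ∈ L then 0 else PySem.Int.mod (fModel L k + fModel L (k+1)) MODp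

lemma emod_small (x M : Int) (h1 : -M ≤ x) (h2 : x < M) :
    x % M = if 0 ≤ x then x else x + M := by
  by_cases h0 : 0 ≤ x
  · rw [if_pos h0]; exact Int.emod_eq_of_lt h0 h2
  · rw [if_neg h0]
    have h3 : x % M = (x + M * 1) % M := (Int.add_mul_emod_self_left (a := x) (b := M) (c := 1)).symm
    rw [h3]
    have : x + M * 1 = x + M := by ring
    rw [this]
    exact Int.emod_eq_of_lt (by omega) (by omega)

lemma pyIdx_mod (M : Nat) (x : Int) (h1 : -(M:Int) ≤ x) (h2 : x < (M:Int)) :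
    PySem.List.pyIdx? M x = some (x % (M:Int)).toNat := by
  rw [emod_small x (M:Int) h1 h2]
  unfold PySem.List.pyIdx?
  split_ifs <;> simp only [Option.some.injEq] <;> omega

lemma pySetD_mod (st : List Int) (x : Int) (v : Int)
    (h1 : -(st.length:Int) ≤ x) (h2 : x < (st.length:Int)) :
    PySem.List.pySetD st x v = st.set (x % (st.length:Int)).toNat v := by
  simp [PySem.List.pySetD, PySem.List.pySet?, pyIdx_mod st.length x h1 h2]

lemma setD_getD_nat (st : List Int) (v : Int) (k j : Nat) (_hk : k < st.length) (hj : j < st.length) :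
    PySem.List.pyGetD (PySem.List.pySetD st (k:Int) v) (j:Int) 0
      = if j = k then v else PySem.List.pyGetD st (j:Int) 0 := by
  rw [PySem.List.pySetD_natCast, PySem.List.pyGetD_natCast, PySem.List.pyGetD_natCast]
  rw [List.getD_eq_getElem _ _ (by simpa using hj), List.getD_eq_getElem _ _ hj]
  rw [List.getElem_set]
  by_cases h : j = k
  · simp [h]
  · rw [if_neg h, if_neg (fun hh => h hh.symm)]

lemma foldl_set_char (a : List Int) : ∀ (st : List Int) (j : Int),
    (∀ x ∈ a, -(st.length:Int) ≤ x ∧ x < (st.length:Int)) → 0 ≤ j → j < (st.length:Int) →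
    PySem.List.pyGetD (a.foldl (fun s x => PySem.List.pySetD s x 0) st) j 0
      = if j ∈ a.map (fun x => PySem.Int.mod x (st.length:Int)) then 0 else PySem.List.pyGetD st j 0 := by
  induction a with
  | nil => intro st j _ _ _; simp
  | cons x t ih =>
    intro st j ha hj0 hjM
    have hM : 0 < st.length := by omega
    have hx := ha x (by simp)
    have hb0 : 0 ≤ x % (st.length:Int) := Int.emod_nonneg x (by exact_mod_cast hM.ne')
    have hbl : x % (st.length:Int) < (st.length:Int) := Int.emod_lt_of_pos x (by exact_mod_cast hM)
    have hset := pySetD_mod st x 0 hx.1 hx.2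
    have hlen : (st.set (x % (st.length:Int)).toNat 0).length = st.length := by simp
    have hmod : PySem.Int.mod x (st.length:Int) = x % (st.length:Int) :=
      PySem.Int.mod_eq_emod_of_pos (by exact_mod_cast hM)
    simp only [List.foldl_cons, List.map_cons, List.mem_cons, hset]
    rw [ih (st.set (x % (st.length:Int)).toNat 0) j
        (by rw [hlen]; intro y hy; exact ha y (by simp [hy]))
        hj0 (by rw [hlen]; exact hjM)]
    rw [hlen]
    by_cases hmem : j ∈ t.map (fun y => PySem.Int.mod y (st.length:Int))
    · simp [hmem]
    · simp only [hmem, or_false, if_false]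
      have hjg : PySem.List.pyGetD (st.set (x % (st.length:Int)).toNat 0) j 0
          = if j.toNat = (x % (st.length:Int)).toNat then 0 else PySem.List.pyGetD st j 0 := by
        have h := setD_getD_nat st 0 (x % (st.length:Int)).toNat j.toNat (by omega) (by omega)
        rw [Int.toNat_of_nonneg hj0] at h
        rw [PySem.List.pySetD_natCast] at h
        exact h
      rw [hjg, hmod]
      by_cases hc : j = x % (st.length:Int)
      · simp [hc]
      · have hcn : ¬ j.toNat = (x % (st.length:Int)).toNat := by omega
        simp [hc, hcn]

lemma MODp_pos : (0:Int) < MODp := by unfold MODp; decide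

-- A's dp loop invariant: after k iterations every entry up to k+1 equals the model
lemma dpA_loop (N : Nat) (L : List Int) (stairs : List Int)
    (hst : ∀ j : Nat, j < N + 10 → PySem.List.pyGetD stairs (j:Int) 0 = if (j:Int) ∈ L then 0 else 1) :
    ∀ k : Nat, k ≤ N →
      (((List.range k).foldl (fun d (i : Nat) => stepAL stairs d (i:Int))
          (PySem.List.pySetD (1 :: List.replicate (N+1) 0) 1 (PySem.List.pyGetD stairs 1 0))).length = N + 2)
      ∧ ∀ j : Nat, j ≤ k + 1 →
        PySem.List.pyGetD ((List.range k).foldl (fun d (i : Nat) => stepAL stairs d (i:Int))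
          (PySem.List.pySetD (1 :: List.replicate (N+1) 0) 1 (PySem.List.pyGetD stairs 1 0))) (j:Int) 0
          = fModel L j := by
  intro k
  induction k with
  | zero =>
    intro _
    have hlen : ((1:Int) :: List.replicate (N+1) 0).length = N + 2 := by simp
    have hset : PySem.List.pySetD ((1:Int) :: List.replicate (N+1) 0) 1 (PySem.List.pyGetD stairs 1 0)
        = ((1:Int) :: List.replicate (N+1) 0).set 1 (PySem.List.pyGetD stairs 1 0) := by
      have := PySem.List.pySetD_natCast ((1:Int) :: List.replicate (N+1) (0:Int)) 1 (PySem.List.pyGetD stairs 1 0)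
      simpa using this
    constructor
    · simp only [List.range_zero, List.foldl_nil, hset]
      simp
    · intro j hj
      simp only [List.range_zero, List.foldl_nil]
      interval_cases j
      · have h0 := setD_getD_nat ((1:Int) :: List.replicate (N+1) 0) (PySem.List.pyGetD stairs 1 0) 1 0
          (by simp) (by simp)
        norm_num at h0 ⊢
        rw [h0]
        simp [fModel]
      · have h1 := setD_getD_nat ((1:Int) :: List.replicate (N+1) 0) (PySem.List.pyGetD stairs 1 0) 1 1
          (by simp) (by simp)
        norm_num at h1 ⊢
        rw [h1]
        have h2 := hst 1 (by omega)
        norm_num at h2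
        rw [h2]
        simp [fModel]
  | succ k ih =>
    intro hk1
    have ⟨ihlen, ihval⟩ := ih (by omega)
    set d := (List.range k).foldl (fun d (i : Nat) => stepAL stairs d (i:Int))
      (PySem.List.pySetD (1 :: List.replicate (N+1) 0) 1 (PySem.List.pyGetD stairs 1 0)) with hd
    have hrange : List.range (k+1) = List.range k ++ [k] := List.range_succ
    rw [hrange, List.foldl_append, List.foldl_cons, List.foldl_nil, ← hd]
    -- unfold one step
    have hcast1 : (k:Int) + 1 = ((k+1 : Nat) : Int) := by push_cast; ring
    have hcast2 : (k:Int) + 2 = ((k+2 : Nat) : Int) := by push_cast; ring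
    set v := (PySem.List.pyGetD d (k:Int) 0 + PySem.List.pyGetD d ((k:Int)+1) 0)
        * PySem.List.pyGetD stairs ((k:Int)+2) 0 with hv
    have hset2 : PySem.List.pySetD d ((k:Int)+2) v = d.set (k+2) v := by
      rw [hcast2, PySem.List.pySetD_natCast]
    have hlen2 : (d.set (k+2) v).length = N + 2 := by simp [ihlen]
    have hget2 : PySem.List.pyGetD (d.set (k+2) v) ((k:Int)+2) 0 = v := by
      rw [hcast2, ← PySem.List.pySetD_natCast d (k+2) v]
      have := setD_getD_nat d v (k+2) (k+2) (by omega) (by omega)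
      simpa using this
    have hstep : stepAL stairs d (k:Int)
        = (d.set (k+2) v).set (k+2) (PySem.Int.mod v MODp) := by
      show PySem.List.pySetD (PySem.List.pySetD d ((k:Int)+2) _) ((k:Int)+2) _ = _
      rw [hset2, hget2, hcast2, PySem.List.pySetD_natCast]
    rw [hstep]
    have hvval : v = (fModel L k + fModel L (k+1)) * (if ((k:Int)+2) ∈ L then 0 else 1) := by
      rw [hv, ihval k (by omega), hcast1, ihval (k+1) (by omega),
          hcast2, hst (k+2) (by omega), ← hcast2]
    have hmodv : PySem.Int.mod v MODp = fModel L (k+2) := by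
      by_cases hmem : ((k:Int)+2) ∈ L
      · rw [hvval]
        simp only [hmem, if_true, mul_zero]
        rw [PySem.Int.mod_eq_emod_of_pos MODp_pos]
        simp [fModel, hmem]
      · rw [hvval]
        simp only [hmem, if_false, mul_one]
        simp [fModel, hmem]
    constructor
    · simp [ihlen]
    · intro j hj
      have h3 := setD_getD_nat (d.set (k+2) v) (PySem.Int.mod v MODp) (k+2) j (by omega) (by omega)
      rw [PySem.List.pySetD_natCast] at h3
      rw [h3]
      by_cases hjk : j = k + 2
      · rw [if_pos hjk, hmodv, hjk]
      · rw [if_neg hjk]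
        have h4 := setD_getD_nat d v (k+2) j (by omega) (by omega)
        rw [PySem.List.pySetD_natCast] at h4
        rw [h4, if_neg hjk]
        exact ihval j (by omega)

-- ===== B-side lemmas: the fib helper and the run-product scan =====

-- mathematical form of Source B's fib helper (mod-reduced Fibonacci with F(0)=F(1)=1)
def gfib : Nat → Int
  | 0 => 1
  | 1 => 1
  | (k+2) => PySem.Int.mod (gfib k + gfib (k+1)) MODp

lemma fib_fold : ∀ m : Nat,
    (List.range m).foldl (fun (p : Int × Int) (_ : Nat) => (p.2, PySem.Int.mod (p.1 + p.2) MODp))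
      ((1:Int), (1:Int)) = (gfib m, gfib (m+1)) := by
  intro m
  induction m with
  | zero => simp [gfib]
  | succ m ih =>
    rw [List.range_succ, List.foldl_append, ih, List.foldl_cons, List.foldl_nil]
    show (gfib (m+1), PySem.Int.mod (gfib m + gfib (m+1)) MODp) = _
    rw [show PySem.Int.mod (gfib m + gfib (m+1)) MODp = gfib (m+2) from rfl]

lemma fibp_natCast (m : Nat) : fibp (m:Int) = gfib m := by
  unfold fibp
  rw [if_neg (by exact_mod_cast Int.not_lt.mpr (Int.natCast_nonneg m))]
  rw [PySem.List.pyRange_zero_nat m]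
  rw [List.foldl_map, fib_fold]

lemma fibp_neg_one : fibp (-1) = 0 := by unfold fibp; norm_num

lemma fibp_rec (rn : Nat) (h : 1 ≤ rn) :
    fibp (rn:Int) = PySem.Int.mod (fibp ((rn:Int)-2) + fibp ((rn:Int)-1)) MODp := by
  match rn, h with
  | 1, _ =>
    show fibp 1 = PySem.Int.mod (fibp (1-2) + fibp (1-1)) MODp
    rw [show ((1:Int)-2) = -1 from rfl, fibp_neg_one,
        show ((1:Int)-1) = ((0:Nat):Int) by norm_num, fibp_natCast,
        show ((1:Int)) = ((1:Nat):Int) by norm_num, fibp_natCast]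
    rw [PySem.Int.mod_eq_emod_of_pos MODp_pos]
    unfold gfib MODp
    decide
  | (r+2), _ =>
    rw [show (((r+2:Nat):Int)-2) = ((r:Nat):Int) by push_cast; ring,
        show (((r+2:Nat):Int)-1) = ((r+1:Nat):Int) by push_cast; ring,
        fibp_natCast, fibp_natCast, fibp_natCast]
    rfl

lemma fModel_bounds (L : List Int) (k : Nat) : 0 ≤ fModel L k ∧ fModel L k < MODp := by
  match k with
  | 0 => refine ⟨by norm_num [fModel], ?_⟩; norm_num [fModel]; unfold MODp; norm_num
  | 1 =>
    unfold fModel; split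
    · exact ⟨le_refl 0, MODp_pos⟩
    · refine ⟨by norm_num, ?_⟩; unfold MODp; norm_num
  | (j+2) =>
    unfold fModel; split
    · exact ⟨le_refl 0, MODp_pos⟩
    · rw [PySem.Int.mod_eq_emod_of_pos MODp_pos]
      exact ⟨Int.emod_nonneg _ (by have := MODp_pos; omega), Int.emod_lt_of_pos _ MODp_pos⟩

lemma mod_mul_mod (a x : Int) : (a * (x % MODp)) % MODp = (a * x) % MODp := by
  conv_lhs => rw [Int.mul_emod]
  rw [Int.emod_emod_of_dvd _ dvd_rfl, ← Int.mul_emod]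

-- B's scan invariant: the accumulator times the climb count of the open run equals A's model
lemma dpB_loop (L : List Int) (stairs : Array Int) (N : Nat)
    (hst : ∀ j : Nat, 1 ≤ j → j ≤ N → aGetD stairs (j:Int) = if (j:Int) ∈ L then 0 else 1) :
    ∀ k : Nat, k ≤ N → ∃ (acc : Int) (rn : Nat),
      (PySem.List.pyRange 1 ((k:Int)+1) 1).foldl (stepB stairs) ((1:Int),(1:Int)) = (acc, (rn:Int)) ∧
      0 ≤ acc ∧ acc < MODp ∧
      fModel L k = PySem.Int.mod (acc * fibp ((rn:Int)-1)) MODp ∧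
      (1 ≤ rn → ((k = 0 ∧ rn = 1 ∧ acc = 1) ∨
        (1 ≤ k ∧ fModel L (k-1) = PySem.Int.mod (acc * fibp ((rn:Int)-2)) MODp))) ∧
      (rn = 0 → 1 ≤ k ∧ fModel L (k-1) = acc) := by
  intro k
  induction k with
  | zero =>
    intro _
    refine ⟨1, 1, ?_, by norm_num, by unfold MODp; norm_num, ?_, ?_, by norm_num⟩
    · rw [show (((0:Nat):Int)+1) = 1 by norm_num, PySem.List.pyRange_one_eq_nil (by norm_num)]
      simp
    · rw [show (((1:Nat):Int)-1) = ((0:Nat):Int) by norm_num, fibp_natCast]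
      show fModel L 0 = PySem.Int.mod (1 * 1) MODp
      rw [PySem.Int.mod_eq_emod_of_pos MODp_pos]
      show (1:Int) = (1 * 1) % MODp
      norm_num
      unfold MODp; norm_num
    · intro _; exact Or.inl ⟨rfl, rfl, rfl⟩
  | succ k ih =>
    intro hk1
    obtain ⟨acc, rn, hfold, hacc0, hacc1, hval, hrun, hzero⟩ := ih (by omega)
    have hsplit : PySem.List.pyRange 1 (((k+1:Nat):Int)+1) 1
        = PySem.List.pyRange 1 ((k:Int)+1) 1 ++ [(k:Int)+1] := by
      rw [show (((k+1:Nat):Int)+1) = ((k:Int)+1)+1 by push_cast; ring]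
      exact PySem.List.pyRange_one_succ_right (by omega)
    rw [hsplit, List.foldl_append, hfold, List.foldl_cons, List.foldl_nil]
    have hs := hst (k+1) (by omega) (by omega)
    rw [show (((k+1:Nat):Int)) = (k:Int)+1 by push_cast; ring] at hs
    have hMne : MODp ≠ 0 := by have := MODp_pos; omega
    by_cases hmem : ((k:Int)+1) ∈ L
    · -- broken step: close the run
      rw [if_pos hmem] at hs
      have hstep : stepB stairs (acc, (rn:Int)) ((k:Int)+1)
          = (PySem.Int.mod (acc * fibp ((rn:Int)-1)) MODp, 0) := by
        unfold stepB; rw [hs]; norm_num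
      rw [hstep]
      have hf1 : fModel L (k+1) = 0 := by
        match k with
        | 0 =>
          show (if (1:Int) ∈ L then 0 else 1) = 0
          rw [if_pos (by simpa using hmem)]
        | (j+1) =>
          show (if ((j:Int)+2) ∈ L then (0:Int) else _) = 0
          rw [if_pos (by
            have : ((j:Int)+2) = ((j+1:Nat):Int)+1 := by push_cast; ring
            rw [this]; exact hmem)]
      refine ⟨PySem.Int.mod (acc * fibp ((rn:Int)-1)) MODp, 0, by simp, ?_, ?_, ?_, ?_, ?_⟩
      · rw [← hval]; exact (fModel_bounds L k).1
      · rw [← hval]; exact (fModel_bounds L k).2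
      · rw [hf1]
        simp only [Nat.cast_zero]
        rw [show ((0:Int)-1) = -1 by ring, fibp_neg_one, mul_zero,
            PySem.Int.mod_eq_emod_of_pos MODp_pos, Int.zero_emod]
      · intro h; exact absurd h (by omega)
      · intro _; exact ⟨by omega, by rw [Nat.add_sub_cancel, hval]⟩
    · -- intact step: extend the run
      rw [if_neg hmem] at hs
      have hstep : stepB stairs (acc, (rn:Int)) ((k:Int)+1) = (acc, ((rn+1:Nat):Int)) := by
        unfold stepB; rw [hs]; norm_num
      rw [hstep]
      have hcast : (((rn+1:Nat):Int)-1) = (rn:Int) := by push_cast; ring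
      have hcast2 : (((rn+1:Nat):Int)-2) = (rn:Int)-1 := by push_cast; ring
      have hmain : fModel L (k+1) = PySem.Int.mod (acc * fibp (rn:Int)) MODp := by
        rcases Nat.eq_zero_or_pos rn with hrn | hrn
        · -- run was just closed at k: fModel k = 0 and fModel (k-1) = acc
          obtain ⟨hk, hprev⟩ := hzero hrn
          obtain ⟨j, rfl⟩ : ∃ j, k = j + 1 := ⟨k - 1, by omega⟩
          rw [Nat.add_sub_cancel] at hprev
          have hfk : fModel L (j+1) = 0 := by
            rw [hval, hrn]
            simp only [Nat.cast_zero]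
            rw [show ((0:Int)-1) = -1 by ring, fibp_neg_one, mul_zero,
                PySem.Int.mod_eq_emod_of_pos MODp_pos, Int.zero_emod]
          show (if ((j:Int)+2) ∈ L then (0:Int)
              else PySem.Int.mod (fModel L j + fModel L (j+1)) MODp) = _
          rw [if_neg (by rw [show ((j:Int)+2) = ((j+1:Nat):Int)+1 by push_cast; ring]; exact hmem)]
          rw [hfk, hprev, add_zero, hrn]
          simp only [Nat.cast_zero]
          rw [show fibp (0:Int) = gfib 0 by exact_mod_cast fibp_natCast 0]
          rw [show gfib 0 = 1 from rfl, mul_one]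
        · rcases hrun hrn with ⟨hk0, hrn1, hacc⟩ | ⟨hk, hprev⟩
          · -- state right after initialisation: k = 0, first step intact
            subst hk0; subst hacc
            show (if (1:Int) ∈ L then (0:Int) else 1) = _
            rw [if_neg (by simpa using hmem), hrn1]
            rw [show ((1:Nat):Int) = ((1:Nat):Int) from rfl, fibp_natCast]
            show (1:Int) = PySem.Int.mod (1 * gfib 1) MODp
            rw [PySem.Int.mod_eq_emod_of_pos MODp_pos]
            unfold gfib MODp
            decide
          · -- generic step: Fibonacci recurrence of the run counts
            obtain ⟨j, rfl⟩ : ∃ j, k = j + 1 := ⟨k - 1, by omega⟩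
            rw [Nat.add_sub_cancel] at hprev
            show (if ((j:Int)+2) ∈ L then (0:Int)
                else PySem.Int.mod (fModel L j + fModel L (j+1)) MODp) = _
            rw [if_neg (by rw [show ((j:Int)+2) = ((j+1:Nat):Int)+1 by push_cast; ring]; exact hmem)]
            rw [hprev, hval, fibp_rec rn hrn]
            simp only [PySem.Int.mod_eq_emod_of_pos MODp_pos]
            rw [mod_mul_mod, ← Int.add_emod, ← mul_add]
      refine ⟨acc, rn+1, rfl, hacc0, hacc1, by rw [hcast]; exact hmain, ?_, by omega⟩
      intro _
      exact Or.inr ⟨by omega, by rw [Nat.add_sub_cancel, hcast2, hval]⟩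

-- ===== VERDICT (by name: the statement is the Claim_ definition above) =====
theorem solve_spec : Claim_equal_solve := by
  intro n a _ hPre
  obtain ⟨hn, ha⟩ := hPre
  unfold Spec_solve solve solve_alt
  lift n to ℕ using hn with N
  have hm10 : ((N:Int) + 10).toNat = N + 10 := by omega
  have hm1 : ((N:Int) + 1).toNat = N + 1 := by omega
  rw [hm10, hm1]
  rw [aGetD_eq, toList_foldl_stepA, toList_aSetD, aGetD_eq]
  set stairsA : Array Int :=
    a.foldl (fun st x => aSetD st x 0) (Array.replicate (N+10) 1) with hsA
  have htl : stairsA.toList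
      = a.foldl (fun st x => PySem.List.pySetD st x 0) (List.replicate (N+10) 1) := by
    rw [hsA, toList_foldl_set, Array.toList_replicate]
  set L : List Int := a.map (fun x => PySem.Int.mod x ((N:Int)+10)) with hL
  have hstairs : ∀ j : Nat, j < N + 10 →
      PySem.List.pyGetD stairsA.toList (j:Int) 0 = if (j:Int) ∈ L then 0 else 1 := by
    intro j hj
    rw [htl]
    have hlen : (List.replicate (N+10) (1:Int)).length = N + 10 := by simp
    have h := foldl_set_char a (List.replicate (N+10) (1:Int)) (j:Int)
      (by rw [hlen]; intro x hx; exact_mod_cast ha x hx)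
      (by positivity) (by rw [hlen]; exact_mod_cast hj)
    rw [hlen] at h
    have hget1 : PySem.List.pyGetD (List.replicate (N+10) (1:Int)) (j:Int) 0 = 1 := by
      rw [PySem.List.pyGetD_natCast, List.getD_eq_getElem _ _ (by simpa using hj)]
      simp
    rw [hget1] at h
    push_cast at h
    rw [hL]
    exact h
  have hA := dpA_loop N L stairsA.toList hstairs N (le_refl N)
  rw [PySem.List.pyRange_zero_nat N, List.foldl_map]
  rw [hA.2 N (by omega)]
  have hstA : ∀ j : Nat, 1 ≤ j → j ≤ N → aGetD stairsA (j:Int) = if (j:Int) ∈ L then 0 else 1 := by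
    intro j _ hj
    rw [aGetD_eq]
    exact hstairs j (by omega)
  obtain ⟨acc, rn, hfold, _, _, hval, _, _⟩ := dpB_loop L stairsA N hstA N (le_refl N)
  rw [hfold]
  exact hval
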